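-- pv_equiv track=rewrite | github.com/Hojott/tira | vko3/forbidden.py | count
-- ===== SOURCE A (Python) =====
-- def count(s):
--     c = 0
--     a = -1 # a is always on latest 'a'
--     for i in range(len(s)):
--         if s[i] == 'a':
--             a = i
--         else:
--             c += i - a
--     return c
-- ===== SOURCE B (Python) =====
-- def count(s):
--     return sum(len(g) * (len(g) + 1) // 2 for g in s.split('a'))
-- ===== Notes on version B (the rewrite author's own statement) =====
-- stated objective: simpler
-- what changed: Replaces the per-character index loop tracking the last-'a' position with str.split on the separator and a closed-form triangular-number sum per run of non-separator characters (C-level split, one arithmetic step per run).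
import Mathlib
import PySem

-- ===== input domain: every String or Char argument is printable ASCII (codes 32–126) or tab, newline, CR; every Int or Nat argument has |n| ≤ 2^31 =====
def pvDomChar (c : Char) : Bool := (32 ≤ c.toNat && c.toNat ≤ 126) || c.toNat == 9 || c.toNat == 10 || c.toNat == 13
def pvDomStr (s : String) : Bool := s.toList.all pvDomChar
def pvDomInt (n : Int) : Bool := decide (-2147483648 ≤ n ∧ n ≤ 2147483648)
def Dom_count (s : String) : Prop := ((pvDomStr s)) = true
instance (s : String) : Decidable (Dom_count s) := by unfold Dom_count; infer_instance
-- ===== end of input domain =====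

-- B replaces the per-index loop tracking the last 'a' with split-on-'a' plus a triangular-number closed form per run (simpler).


-- ===== PORT A =====
-- for i in range(len(s)): inspect s[i]  ≡  fold over the indexed characters, state (c, a)
def count (s : String) : Int :=
  ((PySem.List.enumerate s.toList 0).foldl
    (fun (st : Int × Int) (p : Int × Char) =>
      if p.2 = 'a' then (st.1, p.1) else (st.1 + (p.1 - st.2), st.2))
    ((0 : Int), (-1 : Int))).1

-- ===== PORT B =====
-- exact port of str.split('a') (nonempty separator of length 1): maximal runs between 'a's, empty runs kept
def splitA : List Char → List (List Char)
  | [] => [[]]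
  | c :: t =>
    if c = 'a' then [] :: splitA t
    else
      match splitA t with
      | [] => [[c]]
      | h :: r => (c :: h) :: r

-- sum(len(g)*(len(g)+1)//2 for g in s.split('a'))
def count_alt (s : String) : Int :=
  ((splitA s.toList).map
    (fun g => PySem.Int.floordiv ((g.length : Int) * ((g.length : Int) + 1)) 2)).sum

-- ===== PRECONDITION & SPEC =====
def Spec_count (s : String) (out : Int) : Prop := out = count_alt s
instance (s : String) (out : Int) : Decidable (Spec_count s out) := by unfold Spec_count; infer_instance

-- ===== CLAIM (what is proved, stated in full; the proofs are below) =====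
def Claim_equal_count : Prop := ∀ (s : String), Dom_count s → Spec_count s (count s)

-- ===== LEMMAS AND PROOFS =====

-- distance-counting reference: d = index distance to the last 'a' so far
def countD : List Char → Int → Int
  | [], _ => 0
  | x :: t, d => if x = 'a' then countD t 0 else (d + 1) + countD t (d + 1)

def tri (n : Int) : Int := PySem.Int.floordiv (n * (n + 1)) 2

lemma tri_succ (n : Int) : tri (n + 1) = tri n + (n + 1) := by
  unfold tri
  rw [PySem.Int.floordiv_eq_ediv_of_pos (by omega), PySem.Int.floordiv_eq_ediv_of_pos (by omega)]
  have h : (n + 1) * (n + 1 + 1) = n * (n + 1) + (n + 1) * 2 := by ring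
  rw [h, Int.add_mul_ediv_right _ _ (by norm_num : (2:Int) ≠ 0)]

lemma splitA_ne_nil (l : List Char) : splitA l ≠ [] := by
  cases l with
  | nil => simp [splitA]
  | cons c t =>
    simp only [splitA]
    split
    · simp
    · cases h : splitA t <;> simp

lemma foldA_eq_countD (l : List Char) :
    ∀ (i0 c a : Int),
      ((PySem.List.enumerate l i0).foldl
        (fun (st : Int × Int) (p : Int × Char) =>
          if p.2 = 'a' then (st.1, p.1) else (st.1 + (p.1 - st.2), st.2))
        (c, a)).1 = c + countD l (i0 - a - 1) := by
  induction l with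
  | nil => intro i0 c a; simp [PySem.List.enumerate_nil, countD]
  | cons x t ih =>
    intro i0 c a
    rw [PySem.List.enumerate_cons]
    simp only [List.foldl_cons, countD]
    by_cases hx : x = 'a'
    · simp only [hx, reduceIte]; rw [ih]; ring_nf
    · simp only [if_neg hx]; rw [ih]; ring_nf

lemma countD_eq_triSum (l : List Char) :
    ∀ (d : Int), 0 ≤ d →
      countD l d = ((splitA l).map (fun g => tri (g.length : Int))).sum
        + d * (((splitA l).headI).length : Int) := by
  induction l with
  | nil => intro d _; simp [countD, splitA, tri, PySem.Int.floordiv]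
  | cons x t ih =>
    intro d hd
    by_cases hx : x = 'a'
    · simp only [countD, splitA, hx, reduceIte]
      rw [ih 0 le_rfl]
      simp [tri, PySem.Int.floordiv]
    · simp only [countD, splitA, if_neg hx]
      rw [ih (d + 1) (by omega)]
      cases h : splitA t with
      | nil => exact absurd h (splitA_ne_nil t)
      | cons g r =>
        simp only [List.map_cons, List.sum_cons, List.headI, List.length_cons]
        have := tri_succ (g.length : Int)
        push_cast
        linarith

-- ===== VERDICT (by name: the statement is the Claim_ definition above) =====
theorem count_spec : Claim_equal_count := by
  intro s _
  unfold Spec_count count count_alt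
  rw [foldA_eq_countD]
  have h := countD_eq_triSum s.toList 0 le_rfl
  simp only [zero_mul, add_zero] at h
  norm_num [h, tri]
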